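-- pv_equiv track=rewrite | github.com/JeffreyBrennan/genius | song_clean.py | bb_artist_cleaner
-- ===== SOURCE A (Python) =====
-- from itertools import compress
--
-- def bb_artist_cleaner(artist):
--     artist = artist.lower()
--
--     # List of common feature indicators to be removed to improve search accuracy and shorten search term
--     features = ['featuring', '&', ',', 'feat', 'feat.', 'With']
--
--     if any(substring in artist for substring in features):
--         bool_results = [s in artist for s in features]
--         sub_loc = (list(compress(range(len(bool_results)), bool_results)))
--
--         # For each feature term found in features list, split artist and get the left part
--         for i in range(len(sub_loc)):
--             sub = features[sub_loc[i]]
--             artist = artist.split(sub, 1)[0]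
--
--     # Removes whitespace and replaces common extraneous symbols found in artist names
--     artist = artist.replace('*', '')
--     artist = artist.strip()
--
--     return artist
-- ===== SOURCE B (Python) =====
-- def bb_artist_cleaner(artist):
--     artist = artist.lower()
--
--     features = ['featuring', '&', ',', 'feat', 'feat.', 'With']
--
--     # Single cut at the earliest occurrence of any feature indicator
--     positions = [artist.find(f) for f in features]
--     found = [p for p in positions if p >= 0]
--     if found:
--         artist = artist[:min(found)]
--
--     artist = artist.replace('*', '')
--     artist = artist.strip()
--
--     return artist
-- ===== Notes on version B (the rewrite author's own statement) =====
-- stated objective: simpler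
-- what changed: A detects which features occur (itertools.compress over a bool mask) and then repeatedly splits the shrinking string once per found feature; B computes each feature's first index in the lowered artist once and performs a single cut at the minimum found position, which provably reproduces the sequential left-splits.
import Mathlib
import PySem

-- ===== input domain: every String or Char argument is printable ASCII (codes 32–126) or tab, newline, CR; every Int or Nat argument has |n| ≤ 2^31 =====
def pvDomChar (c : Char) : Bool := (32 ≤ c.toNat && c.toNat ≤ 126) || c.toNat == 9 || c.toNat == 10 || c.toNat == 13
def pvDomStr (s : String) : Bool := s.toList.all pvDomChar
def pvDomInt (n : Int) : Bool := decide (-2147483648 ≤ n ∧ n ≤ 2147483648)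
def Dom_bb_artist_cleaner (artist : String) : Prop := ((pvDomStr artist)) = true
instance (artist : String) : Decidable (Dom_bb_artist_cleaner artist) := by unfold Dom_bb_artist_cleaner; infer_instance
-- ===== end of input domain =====

-- B replaces A's iterative split-at-each-found-feature loop by ONE cut at the earliest
-- occurrence of any feature indicator (objective: simpler — single pass over the feature
-- list, no re-scanning of the shrinking string).

-- ===== PORT A =====
-- itertools.compress(data, selectors), ported by hand (exact: keeps data items whose selector is truthy)
def pyCompress {α : Type} (data : List α) (selectors : List Bool) : List α :=
  ((data.zip selectors).filter (fun p => p.2)).map (fun p => p.1)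

def bb_artist_cleaner (artist : String) : String :=
  let artist1 := PySem.Str.lower artist
  let features : List String := ["featuring", "&", ",", "feat", "feat.", "With"]
  let artist2 :=
    if features.any (fun substring => PySem.Str.isIn substring artist1) then
      let bool_results := features.map (fun s => PySem.Str.isIn s artist1)
      let sub_loc := pyCompress (List.range bool_results.length) bool_results
      -- for i in range(len(sub_loc)): artist = artist.split(features[sub_loc[i]], 1)[0]
      -- (the .getD defaults are unreachable: every index is in range, the separator is
      -- non-empty so splitMax? is some, and split(...) is always non-empty so [0] exists)
      (List.range sub_loc.length).foldl
        (fun a i =>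
          let sub := features.getD (sub_loc.getD i 0) ""
          (PySem.List.pyGet? ((PySem.Str.splitMax? a sub 1).getD []) 0).getD a)
        artist1
    else artist1
  let artist3 := PySem.Str.replace artist2 "*" ""
  PySem.Str.strip artist3

-- ===== PORT B =====
def bb_artist_cleaner_alt (artist : String) : String :=
  let artist1 := PySem.Str.lower artist
  let features : List String := ["featuring", "&", ",", "feat", "feat.", "With"]
  let positions := features.map (fun f => PySem.Str.find artist1 f)
  let found := positions.filter (fun p => 0 ≤ p)
  let artist2 :=
    match PySem.List.min? found (fun p => p) with
    | some m => PySem.Str.slice artist1 none (some m)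
    | none => artist1
  let artist3 := PySem.Str.replace artist2 "*" ""
  PySem.Str.strip artist3

-- ===== PRECONDITION & SPEC =====
def Spec_bb_artist_cleaner (artist : String) (out : String) : Prop := out = bb_artist_cleaner_alt artist
instance (artist : String) (out : String) : Decidable (Spec_bb_artist_cleaner artist out) := by unfold Spec_bb_artist_cleaner; infer_instance

-- ===== CLAIM (what is proved, stated in full; the proofs are below) =====
def Claim_equal_bb_artist_cleaner : Prop := ∀ (artist : String), Dom_bb_artist_cleaner artist → Spec_bb_artist_cleaner artist (bb_artist_cleaner artist)

-- ===== LEMMAS AND PROOFS =====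

def cutD (cs sub : List Char) : Nat :=
  if PySem.Chars.find cs sub = -1 then cs.length else (PySem.Chars.find cs sub).toNat

lemma find_eq_of (cs sub : List Char) (k : Nat)
    (h1 : sub <+: cs.drop k) (h2 : ∀ i < k, ¬ sub <+: cs.drop i) :
    PySem.Chars.find cs sub = (k : Int) := by
  have hinf : sub <:+: cs := by
    obtain ⟨r, hr⟩ := h1
    exact ⟨cs.take k, r, by rw [List.append_assoc, hr]; simp⟩
  have hnn : 0 ≤ PySem.Chars.find cs sub := (PySem.Chars.find_nonneg_iff cs sub).mpr hinf
  obtain ⟨hocc, hmin⟩ := PySem.Chars.find_spec hnn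
  have : (PySem.Chars.find cs sub).toNat = k := by
    rcases lt_trichotomy (PySem.Chars.find cs sub).toNat k with h | h | h
    · exact absurd hocc (h2 _ h)
    · exact h
    · exact absurd h1 (hmin _ h)
  omega

lemma find_lt_length (cs sub : List Char) (hsub : sub ≠ [])
    (h : 0 ≤ PySem.Chars.find cs sub) : (PySem.Chars.find cs sub).toNat < cs.length := by
  obtain ⟨hocc, -⟩ := PySem.Chars.find_spec h
  obtain ⟨r, hr⟩ := hocc
  have hlen : sub.length + r.length = cs.length - (PySem.Chars.find cs sub).toNat := by
    have := congrArg List.length hr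
    simpa using this
  have hle := PySem.Chars.find_le_length cs sub
  have : sub.length ≠ 0 := by simpa using hsub
  omega

lemma cutD_le_length (cs sub : List Char) : cutD cs sub ≤ cs.length := by
  unfold cutD
  split
  · exact le_rfl
  · have := PySem.Chars.find_le_length cs sub
    omega

def pairOK (f g : List Char) : Bool :=
  (List.range f.length).all (fun k => decide (k = 0) || decide (f[k]? ≠ g[0]?))

lemma no_interior_start (cs f g : List Char) (hf : f ≠ []) (hOK : pairOK g f = true)
    (i j : Nat) (hif : f <+: cs.drop i) (hjg : g <+: cs.drop j)
    (hlt : j < i) (hlt2 : i < j + g.length) : False := by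
  have hfl : 0 < f.length := List.length_pos_iff.mpr hf
  have hdi : f.length ≤ (cs.drop i).length := hif.length_le
  have hdj : g.length ≤ (cs.drop j).length := hjg.length_le
  simp only [List.length_drop] at hdi hdj
  have hin : i < cs.length := by omega
  have hkn : j + (i - j) < cs.length := by omega
  have e1 : f[0]'hfl = cs[i]'hin := by
    have := hif.getElem (i := 0) hfl
    simpa [List.getElem_drop] using this
  have hk : i - j < g.length := by omega
  have e2 : g[i - j]'hk = cs[j + (i - j)]'hkn := by
    have := hjg.getElem (i := i - j) hk
    simpa [List.getElem_drop] using this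
  have e3 : g[i - j]'hk = f[0]'hfl := by
    rw [e1, e2]; congr 1; omega
  have := List.all_eq_true.mp hOK (i - j) (List.mem_range.mpr hk)
  simp only [Bool.or_eq_true, decide_eq_true_eq] at this
  rcases this with h | h
  · omega
  · exact h (by rw [List.getElem?_eq_getElem hk, List.getElem?_eq_getElem hfl, e3])

lemma cutD_take (cs f g : List Char) (hf : f ≠ []) (hg : g ≠ [])
    (hgf : pairOK g f = true) :
    cutD (cs.take (cutD cs f)) g = min (cutD cs g) (cutD cs f) := by
  by_cases hFf : PySem.Chars.find cs f = -1
  · have hi' : cutD cs f = cs.length := by simp [cutD, hFf]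
    rw [hi', List.take_length]
    have := cutD_le_length cs g
    omega
  · have hffnn : 0 ≤ PySem.Chars.find cs f := by
      have := PySem.Chars.neg_one_le_find cs f; omega
    have hi'v : cutD cs f = (PySem.Chars.find cs f).toNat := by simp [cutD, hFf]
    set i' := cutD cs f with hi'
    have hi'n : i' < cs.length := hi'v ▸ find_lt_length cs f hf hffnn
    obtain ⟨hoccf, hminf⟩ := PySem.Chars.find_spec hffnn
    rw [← hi'v] at hoccf
    by_cases hFg : PySem.Chars.find cs g = -1
    · -- g absent from cs: absent from the prefix too
      have hnone : PySem.Chars.find (cs.take i') g = -1 := by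
        rw [PySem.Chars.find_eq_neg_one_iff] at hFg ⊢
        intro hinf
        exact hFg (hinf.trans (cs.take_prefix i').isInfix)
      simp [cutD, hnone, hFg]
      omega
    · have hgnn : 0 ≤ PySem.Chars.find cs g := by
        have := PySem.Chars.neg_one_le_find cs g; omega
      have hjv : cutD cs g = (PySem.Chars.find cs g).toNat := by simp [cutD, hFg]
      set jg := cutD cs g with hjgd
      obtain ⟨hoccg, hming⟩ := PySem.Chars.find_spec hgnn
      rw [← hjv] at hoccg
      by_cases hlt : jg < i'
      · -- g's occurrence survives the cut
        have hsep : jg + g.length ≤ i' := by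
          by_contra hcon
          exact no_interior_start cs f g hf hgf i' jg hoccf hoccg hlt (by omega)
        have hocc' : g <+: (cs.take i').drop jg := by
          rw [List.drop_take]
          exact List.prefix_take_iff.mpr ⟨hoccg, by omega⟩
        have hmin' : ∀ i < jg, ¬ g <+: (cs.take i').drop i := by
          intro i hi hcon
          rw [List.drop_take] at hcon
          exact hming i (hjv ▸ hi) (List.prefix_take_iff.mp hcon).1
        have := find_eq_of (cs.take i') g jg hocc' (by intro i hi; exact hmin' i hi)
        simp [cutD, this]
        omega
      · -- the cut lands at or before g's first occurrence: g is gone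
        have hnone : PySem.Chars.find (cs.take i') g = -1 := by
          by_contra hcon
          have hnn : 0 ≤ PySem.Chars.find (cs.take i') g := by
            have := PySem.Chars.neg_one_le_find (cs.take i') g; omega
          obtain ⟨hocc, -⟩ := PySem.Chars.find_spec hnn
          set t := (PySem.Chars.find (cs.take i') g).toNat with ht
          have htl : t < (cs.take i').length := find_lt_length _ g hg hnn
          rw [List.length_take] at htl
          rw [List.drop_take] at hocc
          have := List.prefix_take_iff.mp hocc
          exact hming t (by omega) this.1
        simp [cutD, hnone]
        omega

def fpool : List (List Char) :=
  ["featuring".toList, "&".toList, ",".toList, "feat".toList, "feat.".toList, "With".toList]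

def MCut (gs : List (List Char)) (cs : List Char) : Nat :=
  gs.foldr (fun f r => min (cutD cs f) r) cs.length

lemma fpool_ok : ∀ f ∈ fpool, f ≠ [] ∧ ∀ g ∈ fpool, pairOK f g = true := by decide

lemma MCut_le_length (gs : List (List Char)) (cs : List Char) : MCut gs cs ≤ cs.length := by
  induction gs with
  | nil => simp [MCut]
  | cons f gs ih => simp only [MCut, List.foldr_cons] at ih ⊢; omega

lemma MCut_take (gs : List (List Char)) (cs f : List Char)
    (hf : f ∈ fpool) (hgs : ∀ g ∈ gs, g ∈ fpool) :
    MCut gs (cs.take (cutD cs f)) = min (cutD cs f) (MCut gs cs) := by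
  induction gs with
  | nil => simp [MCut]
  | cons g gs ih =>
    have hgp := hgs g (by simp)
    have hct := cutD_take cs f g (fpool_ok f hf).1 (fpool_ok g hgp).1
      ((fpool_ok g hgp).2 f hf)
    simp only [MCut, List.foldr_cons] at *
    rw [hct, ih (fun g hgm => hgs g (by simp [hgm]))]
    omega

lemma foldl_cut_eq (gs : List (List Char)) (cs : List Char) (hgs : ∀ g ∈ gs, g ∈ fpool) :
    gs.foldl (fun l sub => l.take (cutD l sub)) cs = cs.take (MCut gs cs) := by
  induction gs generalizing cs with
  | nil => simp [MCut]
  | cons f gs ih =>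
    have hfp := hgs f (by simp)
    rw [List.foldl_cons, ih _ (fun g hgm => hgs g (by simp [hgm])),
      MCut_take gs cs f hfp (fun g hgm => hgs g (by simp [hgm]))]
    rw [List.take_take]
    congr 1
    simp only [MCut, List.foldr_cons]
    have h1 := MCut_le_length gs cs
    have h2 := cutD_le_length cs f
    omega

lemma find_prefix_zero (l sub : List Char) (h : sub.isPrefixOf l = true) :
    PySem.Chars.find l sub = 0 := by
  have := find_eq_of l sub 0 (by simpa using List.isPrefixOf_iff_prefix.mp h)
    (by intro i hi; omega)
  simpa using this

lemma find_cons_not_prefix (c : Char) (t sub : List Char)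
    (hnp : sub.isPrefixOf (c :: t) = false) :
    PySem.Chars.find (c :: t) sub =
      if PySem.Chars.find t sub = -1 then -1 else PySem.Chars.find t sub + 1 := by
  by_cases h : PySem.Chars.find t sub = -1
  · simp only [h, if_pos]
    rw [PySem.Chars.find_eq_neg_one_iff] at h ⊢
    intro hinf
    rcases List.infix_cons_iff.mp hinf with hp | hi
    · exact absurd (List.isPrefixOf_iff_prefix.mpr hp) (by simp [hnp])
    · exact h hi
  · have hnn : 0 ≤ PySem.Chars.find t sub := by
      have := PySem.Chars.neg_one_le_find t sub; omega
    obtain ⟨hocc, hmin⟩ := PySem.Chars.find_spec hnn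
    rw [if_neg h]
    have := find_eq_of (c :: t) sub ((PySem.Chars.find t sub).toNat + 1)
      (by simpa using hocc)
      (by
        intro i hi
        match i with
        | 0 =>
          simpa using fun hp => absurd (List.isPrefixOf_iff_prefix.mpr hp) (by simp [hnp])
        | i + 1 =>
          simpa using hmin i (by omega))
    rw [this]; omega

lemma go_acc (sub : List Char) (fuel : Nat) :
    ∀ (m : Nat) (l cur : List Char) (acc : List (List Char)),
    ∃ tail, PySem.Chars.splitOnMax.go sub fuel m l cur acc = acc.reverse ++ tail := by
  induction fuel with
  | zero =>
    intro m l cur acc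
    exact ⟨[cur.reverse ++ l], by simp [PySem.Chars.splitOnMax.go]⟩
  | succ n ih =>
    intro m l cur acc
    match l with
    | [] => exact ⟨[cur.reverse], by simp [PySem.Chars.splitOnMax.go]⟩
    | c :: rest =>
      by_cases hm : m = 0
      · exact ⟨[cur.reverse ++ (c :: rest)], by simp [PySem.Chars.splitOnMax.go, hm]⟩
      · by_cases hp : sub.isPrefixOf (c :: rest) = true
        · obtain ⟨t, ht⟩ := ih (m - 1) (List.drop sub.length (c :: rest)) [] (cur.reverse :: acc)
          refine ⟨cur.reverse :: t, ?_⟩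
          simp only [PySem.Chars.splitOnMax.go]
          rw [if_neg hm, if_pos hp, ht]
          simp
        · obtain ⟨t, ht⟩ := ih m rest (c :: cur) acc
          exact ⟨t, by
            simp only [PySem.Chars.splitOnMax.go]
            rw [if_neg hm, if_neg (by simp [hp]), ht]⟩

lemma go_head (sub : List Char) :
    ∀ (l : List Char) (fuel : Nat) (cur : List Char), l.length < fuel →
    ∃ rest, PySem.Chars.splitOnMax.go sub fuel 1 l cur [] =
      (cur.reverse ++ l.take (cutD l sub)) :: rest := by
  intro l
  induction l with
  | nil =>
    intro fuel cur hfuel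
    match fuel, hfuel with
    | n + 1, _ =>
      refine ⟨[], ?_⟩
      simp [PySem.Chars.splitOnMax.go]
  | cons c rest ih =>
    intro fuel cur hfuel
    match fuel, hfuel with
    | n + 1, hfuel =>
      by_cases hp : sub.isPrefixOf (c :: rest) = true
      · obtain ⟨t, ht⟩ := go_acc sub n 0 (List.drop sub.length (c :: rest)) [] [cur.reverse]
        refine ⟨t, ?_⟩
        simp only [PySem.Chars.splitOnMax.go]
        rw [if_neg (by omega : ¬ (1 : Nat) = 0), if_pos hp, ht]
        simp [cutD, find_prefix_zero _ _ hp]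
      · obtain ⟨t, ht⟩ := ih n (c :: cur) (by simpa using Nat.lt_of_succ_lt_succ hfuel)
        refine ⟨t, ?_⟩
        simp only [PySem.Chars.splitOnMax.go]
        rw [if_neg (by omega : ¬ (1 : Nat) = 0), if_neg (by simp [hp]), ht]
        have hfc := find_cons_not_prefix c rest sub (Bool.eq_false_iff.mpr hp)
        have harg : c :: rest.take (cutD rest sub) = (c :: rest).take (cutD (c :: rest) sub) := by
          by_cases hr : PySem.Chars.find rest sub = -1
          · simp [cutD, hfc, hr]
          · have hnn : 0 ≤ PySem.Chars.find rest sub := by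
              have := PySem.Chars.neg_one_le_find rest sub; omega
            have hne : ¬ (PySem.Chars.find rest sub + 1 = -1) := by omega
            simp only [cutD, hfc, hr, if_neg hne, ite_false]
            have he : (PySem.Chars.find rest sub + 1).toNat = (PySem.Chars.find rest sub).toNat + 1 := by omega
            rw [he, List.take_succ_cons]
        simp [← harg]

lemma splitOnMax_one_head (cs sub : List Char) :
    ∃ rest, PySem.Chars.splitOnMax cs sub 1 = cs.take (cutD cs sub) :: rest := by
  obtain ⟨rest, hr⟩ := go_head sub cs (cs.length + 1) [] (by omega)
  refine ⟨rest, ?_⟩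
  simpa [PySem.Chars.splitOnMax] using hr

lemma foldl_min_min (l : List Int) : ∀ a b : Int, l.foldl min (min a b) = min a (l.foldl min b) := by
  induction l with
  | nil => intro a b; simp
  | cons c l ih =>
    intro a b
    simp only [List.foldl_cons]
    rw [min_assoc, ih]

lemma min_found_eq_MCut (gs : List (List Char)) (cs : List Char) :
    (match ((gs.map (fun f => PySem.Chars.find cs f)).filter (fun p => 0 ≤ p)) with
      | [] => cs.length
      | p :: rest => (rest.foldl min p).toNat) = MCut gs cs := by
  induction gs with
  | nil => simp [MCut]
  | cons f gs ih =>
    simp only [List.map_cons, List.filter_cons]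
    have hMle := MCut_le_length gs cs
    have hMeq : MCut (f :: gs) cs = min (cutD cs f) (MCut gs cs) := rfl
    rw [hMeq]
    have hb := PySem.Chars.neg_one_le_find cs f
    have hl := PySem.Chars.find_le_length cs f
    by_cases hv : (0 : Int) ≤ PySem.Chars.find cs f
    · have hcut : cutD cs f = (PySem.Chars.find cs f).toNat := by simp [cutD]; omega
      rw [if_pos (by simpa using hv)]
      cases hm : (gs.map (fun f => PySem.Chars.find cs f)).filter (fun p => 0 ≤ p) with
      | nil =>
        rw [hm] at ih
        change cs.length = MCut gs cs at ih
        simp only [List.foldl_nil]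
        rw [hcut, eq_comm]
        exact min_eq_left (by omega)
      | cons p rest =>
        rw [hm] at ih
        change (rest.foldl min p).toNat = MCut gs cs at ih
        simp only [List.foldl_cons]
        rw [foldl_min_min, hcut, ← ih]
        rcases le_total (PySem.Chars.find cs f) (rest.foldl min p) with h | h
        · rw [min_eq_left h, min_eq_left (by omega)]
        · rw [min_eq_right h, min_eq_right (by omega)]
    · have hcut : cutD cs f = cs.length := by simp [cutD]; omega
      rw [if_neg (by simpa using hv), ih, hcut, eq_comm]
      exact min_eq_right hMle

-- range-indexed loop = loop over the list itself
lemma foldl_range_getD {α β : Type} (xs : List α) (d : α) (g : β → α → β) :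
    ∀ (n : Nat), n ≤ xs.length → ∀ (b : β),
    (List.range n).foldl (fun a i => g a (xs.getD i d)) b = (xs.take n).foldl g b := by
  intro n
  induction n with
  | zero => intro _ b; simp
  | succ n ih =>
    intro hn b
    rw [List.range_succ, List.foldl_append, ih (by omega)]
    simp only [List.foldl_cons, List.foldl_nil]
    rw [List.take_add_one]
    rw [List.getElem?_eq_getElem (by omega : n < xs.length)]
    simp only [Option.toList_some]
    rw [List.foldl_append]
    simp only [List.foldl_cons, List.foldl_nil]
    congr 1
    rw [List.getD_eq_getElem xs d (by omega)]

lemma foldl_range_getD_all {α β : Type} (xs : List α) (d : α) (g : β → α → β) (b : β) :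
    (List.range xs.length).foldl (fun a i => g a (xs.getD i d)) b = xs.foldl g b := by
  rw [foldl_range_getD xs d g xs.length le_rfl b, List.take_length]

lemma mem_pyCompress {α : Type} (x : α) (data : List α) (sel : List Bool)
    (h : x ∈ pyCompress data sel) : x ∈ data := by
  simp only [pyCompress, List.mem_map, List.mem_filter] at h
  obtain ⟨p, ⟨hp, -⟩, rfl⟩ := h
  exact (List.of_mem_zip hp).1

lemma mem_pyCompress_range (sel : List Bool) (i : Nat) (hi : i < sel.length)
    (hsel : sel[i] = true) : i ∈ pyCompress (List.range sel.length) sel := by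
  simp only [pyCompress, List.mem_map, List.mem_filter]
  refine ⟨(i, sel[i]), ⟨?_, by simp [hsel]⟩, rfl⟩
  have hil : i < ((List.range sel.length).zip sel).length := by
    simp
    omega
  have := List.getElem_zip (l := List.range sel.length) (l' := sel) (i := i) (h := hil)
  rw [List.getElem_range] at this
  exact this ▸ List.getElem_mem hil

-- the string-level split-head step
lemma stepStr_eq (a sub : String) (hsub : sub.toList ≠ []) :
    (PySem.List.pyGet? ((PySem.Str.splitMax? a sub 1).getD []) 0).getD a =
      String.ofList (a.toList.take (cutD a.toList sub.toList)) := by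
  obtain ⟨rest, hr⟩ := splitOnMax_one_head a.toList sub.toList
  have hs : PySem.Str.splitMax? a sub 1 =
      some (String.ofList (a.toList.take (cutD a.toList sub.toList)) :: rest.map String.ofList) := by
    have hmap := PySem.Str.splitMax?_map a sub 1
    rw [PySem.Chars.splitMax?, if_neg (by simpa using hsub), hr] at hmap
    cases hsp : PySem.Str.splitMax? a sub 1 with
    | none => rw [hsp] at hmap; simp at hmap
    | some l =>
      rw [hsp] at hmap
      simp only [Option.map_some, Option.some_inj] at hmap
      congr 1
      calc l = (l.map String.toList).map String.ofList := by
              simp [Function.comp_def, String.ofList_toList]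
        _ = _ := by rw [hmap]; simp
  rw [hs]
  simp [PySem.List.pyGet?, PySem.List.pyIdx?]

lemma MCut_le_of_mem (gs : List (List Char)) (cs f : List Char) (h : f ∈ gs) :
    MCut gs cs ≤ cutD cs f := by
  induction gs with
  | nil => simp at h
  | cons g gs ih =>
    rcases List.mem_cons.mp h with rfl | h
    · simp only [MCut, List.foldr_cons]
      exact min_le_left _ _
    · calc MCut (g :: gs) cs ≤ MCut gs cs := min_le_right _ _
        _ ≤ cutD cs f := ih h

lemma MCut_le_MCut (gs₁ gs₂ : List (List Char)) (cs : List Char)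
    (h : ∀ f ∈ gs₁, f ∈ gs₂ ∨ cutD cs f = cs.length) :
    MCut gs₂ cs ≤ MCut gs₁ cs := by
  induction gs₁ with
  | nil => simpa [MCut] using MCut_le_length gs₂ cs
  | cons f gs ih =>
    have h2 : MCut gs₂ cs ≤ cutD cs f := by
      rcases h f (by simp) with hm | he
      · exact MCut_le_of_mem gs₂ cs f hm
      · rw [he]; exact MCut_le_length gs₂ cs
    have h3 := ih (fun f hf => h f (by simp [hf]))
    simp only [MCut, List.foldr_cons] at *
    omega

lemma foldl_step_min (F : Option Int → Int → Option Int)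
    (hF : ∀ m x, F (some m) x = if x < m then some x else some m) :
    ∀ (xs : List Int) (a : Int), xs.foldl F (some a) = some (xs.foldl min a) := by
  intro xs
  induction xs with
  | nil => intro a; simp
  | cons x xs ih =>
    intro a
    simp only [List.foldl_cons]
    rw [hF, show (if x < a then some x else some a) = some (min a x) by
      rcases le_or_gt a x with h | h
      · rw [if_neg (by omega), min_eq_left h]
      · rw [if_pos h, min_eq_right (by omega)]]
    exact ih (min a x)

lemma min?_int_eq (l : List Int) :
    PySem.List.min? l (fun p => p) =
      (match l with | [] => none | p :: rest => some (rest.foldl min p)) := by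
  cases l with
  | nil => rfl
  | cons p rest =>
    simp only [PySem.List.min?, List.foldl_cons]
    exact foldl_step_min _ (fun m x => rfl) rest p

lemma foldl_min_nonneg (rest : List Int) : ∀ (p : Int), 0 ≤ p → (∀ x ∈ rest, 0 ≤ x) →
    0 ≤ rest.foldl min p := by
  induction rest with
  | nil => intro p hp _; simpa using hp
  | cons q rest ih =>
    intro p hp hall
    simp only [List.foldl_cons]
    refine ih (min p q) ?_ (fun x hx => hall x (by simp [hx]))
    have := hall q (by simp)
    omega

def bbFeatures : List String := ["featuring", "&", ",", "feat", "feat.", "With"]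

def bbStep (a sub : String) : String :=
  (PySem.List.pyGet? ((PySem.Str.splitMax? a sub 1).getD []) 0).getD a

def bbSubLoc (s1 : String) : List Nat :=
  pyCompress (List.range (bbFeatures.map (fun s => PySem.Str.isIn s s1)).length)
    (bbFeatures.map (fun s => PySem.Str.isIn s s1))

def bbLoop (s1 : String) : String :=
  (List.range (bbSubLoc s1).length).foldl
    (fun a i => bbStep a (bbFeatures.getD ((bbSubLoc s1).getD i 0) "")) s1

lemma foldl_bbStep (gs : List String) (h : ∀ g ∈ gs, g.toList ≠ []) :
    ∀ (a : String),
    (gs.foldl bbStep a).toList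
      = (gs.map String.toList).foldl (fun l sub => l.take (cutD l sub)) a.toList := by
  induction gs with
  | nil => intro a; simp
  | cons g gs ih =>
    intro a
    simp only [List.foldl_cons, List.map_cons, bbStep]
    rw [stepStr_eq a g (h g (by simp)), ih (fun g hg => h g (by simp [hg]))]
    simp [String.toList_ofList]

lemma MCut_eq_length_of (gs : List (List Char)) (cs : List Char)
    (h : ∀ f ∈ gs, cutD cs f = cs.length) : MCut gs cs = cs.length := by
  induction gs with
  | nil => simp [MCut]
  | cons f gs ih =>
    have h1 := h f (by simp)
    have h2 := ih (fun f hf => h f (by simp [hf]))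
    simp only [MCut, List.foldr_cons] at *
    omega

lemma isIn_false_cutD (s1 f : String) (h : PySem.Str.isIn f s1 = false) :
    cutD s1.toList f.toList = s1.toList.length := by
  rw [PySem.Str.isIn_eq] at h
  have := (PySem.Chars.isIn_eq_false_iff _ _).mp h
  rw [cutD, if_pos ((PySem.Chars.find_eq_neg_one_iff _ _).mpr this)]

lemma fpool_exists_idx (f : List Char) (hf : f ∈ fpool) :
    ∃ k, k < 6 ∧ (bbFeatures.getD k "").toList = f := by
  fin_cases hf
  · exact ⟨0, by omega, rfl⟩
  · exact ⟨1, by omega, rfl⟩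
  · exact ⟨2, by omega, rfl⟩
  · exact ⟨3, by omega, rfl⟩
  · exact ⟨4, by omega, rfl⟩
  · exact ⟨5, by omega, rfl⟩

lemma mem_gsList_of_isIn (s1 : String) (k : Nat) (hk : k < 6)
    (h : PySem.Str.isIn (bbFeatures.getD k "") s1 = true) :
    (bbFeatures.getD k "").toList ∈ (bbSubLoc s1).map (fun j => (bbFeatures.getD j "").toList) := by
  have hlen : (bbFeatures.map (fun s => PySem.Str.isIn s s1)).length = 6 := by
    simp [bbFeatures]
  have hsel : (bbFeatures.map (fun s => PySem.Str.isIn s s1))[k]'(by omega) = true := by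
    rw [List.getElem_map]
    have : bbFeatures[k]'(by simp [bbFeatures]; omega) = bbFeatures.getD k "" := by
      rw [List.getD_eq_getElem _ _ (by simp [bbFeatures]; omega)]
    rw [this]
    exact h
  have := mem_pyCompress_range (bbFeatures.map (fun s => PySem.Str.isIn s s1)) k (by omega) hsel
  rw [hlen] at this
  refine List.mem_map.mpr ⟨k, ?_, rfl⟩
  simpa [bbSubLoc, hlen] using this

lemma mem_bbSubLoc_lt (s1 : String) (j : Nat) (hj : j ∈ bbSubLoc s1) : j < 6 := by
  have := mem_pyCompress j _ _ hj
  simp only [List.mem_range] at this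
  simpa [bbFeatures] using this

lemma getD_features_nonempty (j : Nat) (hj : j < 6) : (bbFeatures.getD j "").toList ≠ [] := by
  interval_cases j <;> decide

lemma getD_features_mem_fpool (j : Nat) (hj : j < 6) : (bbFeatures.getD j "").toList ∈ fpool := by
  interval_cases j <;> decide

lemma A2_eq (s1 : String) :
    (if bbFeatures.any (fun substring => PySem.Str.isIn substring s1) then bbLoop s1 else s1)
      = String.ofList (s1.toList.take (MCut fpool s1.toList)) := by
  by_cases hg : bbFeatures.any (fun substring => PySem.Str.isIn substring s1) = true
  · rw [if_pos hg]
    apply String.toList_inj.mp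
    rw [bbLoop, foldl_range_getD_all (bbSubLoc s1) 0
      (fun a j => bbStep a (bbFeatures.getD j "")) s1, ← List.foldl_map]
    rw [foldl_bbStep _ (by
      intro g hgm
      obtain ⟨j, hj, rfl⟩ := List.mem_map.mp hgm
      exact getD_features_nonempty j (mem_bbSubLoc_lt s1 j hj))]
    rw [List.map_map]
    rw [foldl_cut_eq _ _ (by
      intro g hgm
      obtain ⟨j, hj, rfl⟩ := List.mem_map.mp hgm
      exact getD_features_mem_fpool j (mem_bbSubLoc_lt s1 j hj))]
    rw [String.toList_ofList]
    congr 1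
    apply le_antisymm
    · apply MCut_le_MCut
      intro f hf
      obtain ⟨k, hk, rfl⟩ := fpool_exists_idx f hf
      by_cases hIn : PySem.Str.isIn (bbFeatures.getD k "") s1 = true
      · left
        have := mem_gsList_of_isIn s1 k hk hIn
        simpa [Function.comp_def] using this
      · right
        exact isIn_false_cutD s1 _ (by simpa using hIn)
    · apply MCut_le_MCut
      intro f hf
      left
      obtain ⟨j, hj, rfl⟩ := List.mem_map.mp hf
      exact getD_features_mem_fpool j (mem_bbSubLoc_lt s1 j hj)
  · rw [if_neg hg]
    have hall : ∀ g ∈ bbFeatures, PySem.Str.isIn g s1 = false := by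
      intro g hgm
      have := (List.any_eq_false ..).mp (Bool.eq_false_iff.mpr hg)
      simpa using this g hgm
    have hlen : MCut fpool s1.toList = s1.toList.length := by
      apply MCut_eq_length_of
      intro f hf
      obtain ⟨k, hk, rfl⟩ := fpool_exists_idx f hf
      refine isIn_false_cutD s1 _ (hall _ ?_)
      interval_cases k <;> decide
    rw [hlen, List.take_length, String.ofList_toList]

lemma B2_eq (s1 : String) :
    (match PySem.List.min?
        ((bbFeatures.map (fun f => PySem.Str.find s1 f)).filter (fun p => 0 ≤ p)) (fun p => p) with
      | some m => PySem.Str.slice s1 none (some m)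
      | none => s1)
      = String.ofList (s1.toList.take (MCut fpool s1.toList)) := by
  have hmap : bbFeatures.map (fun f => PySem.Str.find s1 f)
      = fpool.map (fun f => PySem.Chars.find s1.toList f) := by
    simp [bbFeatures, fpool, PySem.Str.find_eq]
  have hM := min_found_eq_MCut fpool s1.toList
  rw [min?_int_eq, hmap]
  cases hm : (fpool.map (fun f => PySem.Chars.find s1.toList f)).filter (fun p => 0 ≤ p) with
  | nil =>
    rw [hm] at hM
    change s1.toList.length = MCut fpool s1.toList at hM
    simp only
    rw [← hM, List.take_length, String.ofList_toList]
  | cons p rest =>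
    rw [hm] at hM
    change (rest.foldl min p).toNat = MCut fpool s1.toList at hM
    simp only
    have hnn : 0 ≤ rest.foldl min p := by
      have hmemf : ∀ x ∈ p :: rest, (0 : Int) ≤ x := by
        intro x hx
        have : x ∈ (fpool.map (fun f => PySem.Chars.find s1.toList f)).filter (fun p => 0 ≤ p) := by
          rw [hm]; exact hx
        simpa using (List.mem_filter.mp this).2
      exact foldl_min_nonneg rest p (hmemf p (by simp)) (fun x hx => hmemf x (by simp [hx]))
    apply String.toList_inj.mp
    rw [PySem.Str.toList_slice]
    simp only [PySem.Chars.slice_eq_listSlice]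
    rw [PySem.List.slice_to _ hnn, hM, String.toList_ofList]

-- ===== VERDICT (by name: the statement is the Claim_ definition above) =====
theorem bb_artist_cleaner_spec : Claim_equal_bb_artist_cleaner := by
  intro artist _
  show bb_artist_cleaner artist = bb_artist_cleaner_alt artist
  calc bb_artist_cleaner artist
      = PySem.Str.strip (PySem.Str.replace
          (if bbFeatures.any (fun substring => PySem.Str.isIn substring (PySem.Str.lower artist))
            then bbLoop (PySem.Str.lower artist) else PySem.Str.lower artist) "*" "") := rfl
    _ = PySem.Str.strip (PySem.Str.replace
          (String.ofList ((PySem.Str.lower artist).toList.take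
            (MCut fpool (PySem.Str.lower artist).toList))) "*" "") := by rw [A2_eq]
    _ = PySem.Str.strip (PySem.Str.replace
          (match PySem.List.min?
              ((bbFeatures.map (fun f => PySem.Str.find (PySem.Str.lower artist) f)).filter
                (fun p => 0 ≤ p)) (fun p => p) with
            | some m => PySem.Str.slice (PySem.Str.lower artist) none (some m)
            | none => PySem.Str.lower artist) "*" "") := by rw [B2_eq]
    _ = bb_artist_cleaner_alt artist := rfl
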